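-- pv_equiv track=rewrite | github.com/zhanghy-b/ai-codescaner | python/utils.py | remove_clang_unsupport_cmds
-- ===== SOURCE A (Python) =====
-- def remove_clang_unsupport_cmds(compile_args):
--     compile_args = [arg for arg in compile_args if '/we' not in arg]  # Exclude the file name
--     compile_args = [arg for arg in compile_args if '-external:W0' not in arg]  # Exclude the file name
--     compile_args = [arg for arg in compile_args if '/RTC1' not in arg]  # Exclude the file name
--     compile_args = [arg for arg in compile_args if '--' not in arg]  # Exclude the file name
--     compile_args = ['-isystem' if arg == '-external:I' else arg for arg in compile_args]  # Exclude the file name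
--     compile_args = compile_args[0: len(compile_args) - 1]  # Skip the first argument which is the compiler name
--     # 启用微软语法扩展（如 __declspec、__stdcall）
--     compile_args.insert(1, '-fms-extensions')
--     # 模拟 MSVC 行为，兼容 Windows 头文件
--     compile_args.insert(1, '-fms-compatibility')
--     compile_args.insert(1, '-DWIN32_LEAN_AND_MEAN')
--     compile_args.insert(1, '-std=c++14')
--     return compile_args
-- ===== SOURCE B (Python) =====
-- BAD = ('/we', '-external:W0', '/RTC1', '--')
-- MSVC = ('-std=c++14', '-DWIN32_LEAN_AND_MEAN', '-fms-compatibility', '-fms-extensions')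
--
--
-- def remove_clang_unsupport_cmds(compile_args):
--     result = []
--     prev = None  # lag-1 buffer: the trailing usable arg (the file name) is never emitted
--     for arg in compile_args:
--         if any(bad in arg for bad in BAD):
--             continue
--         arg = '-isystem' if arg == '-external:I' else arg
--         if not result:
--             result = [arg, *MSVC]  # compiler name first, then the compatibility flags
--         elif prev is None:
--             prev = arg
--         else:
--             result.append(prev)
--             prev = arg
--     return result or list(MSVC)
-- ===== Notes on version B (the rewrite author's own statement) =====
-- stated objective: alternative
-- what changed: Replaces A's five staged list rebuilds plus a slice and four insert(1,...) calls with one streaming loop that emits the compiler name and flags up front and pushes later args through a lag-1 buffer so the trailing arg is dropped online.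
-- intended difference: On inputs where fewer than two arguments survive the filter, A's insert(1,...) calls land in a too-short list and return the four flags in an accidental interleaved order with the compiler name dropped; B keeps the compiler name (when present) and splices the flags after it in their intended order. — e.g. on remove_clang_unsupport_cmds(["cl.exe"]): A returns ["-fms-extensions", "-std=c++14", "-DWIN32_LEAN_AND_MEAN", "-fms-compatibility"], B returns ["cl.exe", "-std=c++14", "-DWIN32_LEAN_AND_MEAN", "-fms-compatibility", "-fms-extensions"]
import Mathlib
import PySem

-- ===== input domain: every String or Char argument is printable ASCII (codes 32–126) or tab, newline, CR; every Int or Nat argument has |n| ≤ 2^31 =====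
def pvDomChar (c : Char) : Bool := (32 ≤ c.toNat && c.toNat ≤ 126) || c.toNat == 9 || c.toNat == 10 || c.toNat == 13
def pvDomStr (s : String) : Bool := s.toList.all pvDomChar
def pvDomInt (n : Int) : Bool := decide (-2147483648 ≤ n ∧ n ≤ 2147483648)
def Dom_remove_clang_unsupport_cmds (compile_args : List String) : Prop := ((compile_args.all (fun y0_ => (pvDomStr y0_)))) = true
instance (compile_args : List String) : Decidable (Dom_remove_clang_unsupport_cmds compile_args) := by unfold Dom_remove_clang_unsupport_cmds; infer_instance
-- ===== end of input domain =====

-- B is one streaming loop with a lag-1 buffer instead of A's staged rebuilds, slice and inserts; on degenerate inputs (fewer than two surviving args) B's flag order is the intended one (see D_).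

-- ===== PORT A =====
def remove_clang_unsupport_cmds (compile_args : List String) : List String :=
  let a1 := compile_args.filter (fun arg => !(PySem.Str.isIn "/we" arg))
  let a2 := a1.filter (fun arg => !(PySem.Str.isIn "-external:W0" arg))
  let a3 := a2.filter (fun arg => !(PySem.Str.isIn "/RTC1" arg))
  let a4 := a3.filter (fun arg => !(PySem.Str.isIn "--" arg))
  let a5 := a4.map (fun arg => if arg = "-external:I" then "-isystem" else arg)
  let a6 := PySem.List.slice a5 (some 0) (some ((a5.length : Int) - 1))
  let a7 := PySem.List.insert a6 1 "-fms-extensions"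
  let a8 := PySem.List.insert a7 1 "-fms-compatibility"
  let a9 := PySem.List.insert a8 1 "-DWIN32_LEAN_AND_MEAN"
  PySem.List.insert a9 1 "-std=c++14"

-- ===== PORT B =====
def pvBad (arg : String) : Bool :=
  PySem.Str.isIn "/we" arg || PySem.Str.isIn "-external:W0" arg ||
  PySem.Str.isIn "/RTC1" arg || PySem.Str.isIn "--" arg

def pvSub (arg : String) : String := if arg = "-external:I" then "-isystem" else arg

def pvMsvc : List String :=
  ["-std=c++14", "-DWIN32_LEAN_AND_MEAN", "-fms-compatibility", "-fms-extensions"]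

-- Source B's loop body: state is (result, prev). prev is the lag-1 buffer.
def pvStep (st : List String × Option String) (arg : String) : List String × Option String :=
  if pvBad arg then st
  else
    let a := pvSub arg
    if st.1 = [] then (a :: pvMsvc, st.2)
    else
      match st.2 with
      | none => (st.1, some a)
      | some p => (st.1 ++ [p], some a)

def remove_clang_unsupport_cmds_alt (compile_args : List String) : List String :=
  let st := compile_args.foldl pvStep ([], none)
  if st.1 = [] then pvMsvc else st.1

-- ===== PRECONDITION & SPEC =====
-- On inputs where fewer than two arguments survive the filter, A's insert(1,...) calls land in a
-- too-short list and return the four flags in an accidental interleaved order with the compiler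
-- name dropped; B keeps the compiler name (when present) and splices the flags after it in their
-- intended order.
def D_remove_clang_unsupport_cmds (compile_args : List String) : Prop :=
  (compile_args.filter (fun a =>
    !(PySem.Str.isIn "/we" a || PySem.Str.isIn "-external:W0" a ||
      PySem.Str.isIn "/RTC1" a || PySem.Str.isIn "--" a))).length < 2
instance (compile_args : List String) : Decidable (D_remove_clang_unsupport_cmds compile_args) := by unfold D_remove_clang_unsupport_cmds; infer_instance

def Spec_remove_clang_unsupport_cmds (compile_args : List String) (out : List String) : Prop := ¬ D_remove_clang_unsupport_cmds compile_args → out = remove_clang_unsupport_cmds_alt compile_args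
instance (compile_args : List String) (out : List String) : Decidable (Spec_remove_clang_unsupport_cmds compile_args out) := by unfold Spec_remove_clang_unsupport_cmds; infer_instance

def pvDiffWitness_remove_clang_unsupport_cmds : List String := ["cl.exe"]
def pvDiffWitnessOut_remove_clang_unsupport_cmds : (List String) × (List String) :=
  (["-fms-extensions", "-std=c++14", "-DWIN32_LEAN_AND_MEAN", "-fms-compatibility"],
   ["cl.exe", "-std=c++14", "-DWIN32_LEAN_AND_MEAN", "-fms-compatibility", "-fms-extensions"])

-- ===== CLAIM (what is proved, stated in full; the proofs are below) =====
def Claim_unchanged_remove_clang_unsupport_cmds : Prop := ∀ (compile_args : List String), Dom_remove_clang_unsupport_cmds compile_args → Spec_remove_clang_unsupport_cmds compile_args (remove_clang_unsupport_cmds compile_args)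
def Claim_changed_remove_clang_unsupport_cmds : Prop := Dom_remove_clang_unsupport_cmds (pvDiffWitness_remove_clang_unsupport_cmds) ∧ D_remove_clang_unsupport_cmds (pvDiffWitness_remove_clang_unsupport_cmds) ∧ remove_clang_unsupport_cmds (pvDiffWitness_remove_clang_unsupport_cmds) = pvDiffWitnessOut_remove_clang_unsupport_cmds.1 ∧ remove_clang_unsupport_cmds_alt (pvDiffWitness_remove_clang_unsupport_cmds) = pvDiffWitnessOut_remove_clang_unsupport_cmds.2 ∧ pvDiffWitnessOut_remove_clang_unsupport_cmds.1 ≠ pvDiffWitnessOut_remove_clang_unsupport_cmds.2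
def Claim_exact_remove_clang_unsupport_cmds : Prop := ∀ (compile_args : List String), Dom_remove_clang_unsupport_cmds compile_args → D_remove_clang_unsupport_cmds compile_args → remove_clang_unsupport_cmds compile_args ≠ remove_clang_unsupport_cmds_alt compile_args

-- ===== LEMMAS AND PROOFS =====
theorem pv_slice_dropLast (l : List String) :
    PySem.List.slice l (some 0) (some ((l.length : Int) - 1)) = l.dropLast := by
  cases l with
  | nil => simp [PySem.List.slice]
  | cons a t =>
    rw [PySem.List.slice_zero_start, PySem.List.slice_to]
    simp [List.dropLast_eq_take]
    simp

theorem pv_filters (xs : List String) :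
    (((xs.filter (fun arg => !(PySem.Str.isIn "/we" arg))).filter
        (fun arg => !(PySem.Str.isIn "-external:W0" arg))).filter
        (fun arg => !(PySem.Str.isIn "/RTC1" arg))).filter
        (fun arg => !(PySem.Str.isIn "--" arg))
    = xs.filter (fun a => !pvBad a) := by
  simp only [List.filter_filter]
  apply List.filter_congr
  intro a _
  simp [pvBad]
  generalize PySem.Chars.isIn ['/', 'w', 'e'] a.toList = b1
  generalize PySem.Chars.isIn ['-', 'e', 'x', 't', 'e', 'r', 'n', 'a', 'l', ':', 'W', '0'] a.toList = b2
  generalize PySem.Chars.isIn ['/', 'R', 'T', 'C', '1'] a.toList = b3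
  generalize PySem.Chars.isIn ['-', '-'] a.toList = b4
  cases b1 <;> cases b2 <;> cases b3 <;> cases b4 <;> rfl

-- the fold skips bad args, so it is the fold of the good-arg step over the filtered+substituted list
def pvGood (st : List String × Option String) (a : String) : List String × Option String :=
  if st.1 = [] then (a :: pvMsvc, st.2)
  else
    match st.2 with
    | none => (st.1, some a)
    | some p => (st.1 ++ [p], some a)

theorem pv_fold_skip (xs : List String) (st : List String × Option String) :
    xs.foldl pvStep st
    = ((xs.filter (fun a => !pvBad a)).map pvSub).foldl pvGood st := by
  induction xs generalizing st with
  | nil => rfl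
  | cons x t ih =>
    by_cases h : pvBad x = true
    · simp [h, List.foldl_cons, pvStep, ih]
    · simp only [Bool.not_eq_true] at h
      simp [h, List.foldl_cons, pvStep, pvGood, ih]

theorem pv_insert_one (h : String) (r : List String) (v : String) :
    PySem.List.insert (h :: r) 1 v = h :: v :: r := by
  have := PySem.List.insert_natCast (h :: r) 1 v (by simp)
  simpa using this

theorem pv_fold_lag (rest : List String) (p : String) (res : List String) (h : res ≠ []) :
    rest.foldl pvGood (res, some p) = (res ++ (p :: rest).dropLast, some (rest.getLastD p)) := by
  induction rest generalizing p res with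
  | nil => simp
  | cons c t ih =>
    have step : pvGood (res, some p) c = (res ++ [p], some c) := by
      simp [pvGood, h]
    rw [List.foldl_cons, step, ih c (res ++ [p]) (by simp)]
    cases t with
    | nil => simp
    | cons d u =>
      obtain ⟨x, hx⟩ := Option.isSome_iff_exists.mp
        (by simp [List.getLast?_isSome] : (d :: u).getLast?.isSome)
      simp [hx]

-- ===== VERDICT (by name: the statement is the Claim_ definition above) =====
theorem remove_clang_unsupport_cmds_spec : Claim_unchanged_remove_clang_unsupport_cmds := by
  intro compile_args _
  unfold Spec_remove_clang_unsupport_cmds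
  intro hnd0
  unfold D_remove_clang_unsupport_cmds at hnd0
  have hnd : ¬(compile_args.filter (fun a => !pvBad a)).length < 2 := hnd0
  simp only [remove_clang_unsupport_cmds, remove_clang_unsupport_cmds_alt]
  rw [show (fun arg => if arg = "-external:I" then "-isystem" else arg) = pvSub from rfl,
    pv_filters, pv_slice_dropLast, pv_fold_skip]
  obtain ⟨a, b, rest, hF⟩ : ∃ a b rest,
      compile_args.filter (fun a => !pvBad a) = a :: b :: rest := by
    rcases hF : compile_args.filter (fun a => !pvBad a) with _ | ⟨a, t⟩
    · rw [hF] at hnd; simp at hnd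
    · rcases t with _ | ⟨b, r⟩
      · rw [hF] at hnd; simp at hnd
      · exact ⟨a, b, r, rfl⟩
  rw [hF]
  simp only [List.map_cons, List.foldl_cons]
  have s1 : pvGood ([], none) (pvSub a) = (pvSub a :: pvMsvc, none) := by simp [pvGood]
  have s2 : pvGood (pvSub a :: pvMsvc, none) (pvSub b) = (pvSub a :: pvMsvc, some (pvSub b)) := by
    simp [pvGood]
  rw [s1, s2, pv_fold_lag _ _ _ (by simp)]
  have hd : (pvSub a :: pvSub b :: rest.map pvSub).dropLast
      = pvSub a :: (pvSub b :: rest.map pvSub).dropLast :=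
    List.dropLast_cons_of_ne_nil (by simp)
  rw [hd, pv_insert_one, pv_insert_one, pv_insert_one, pv_insert_one]
  simp [pvMsvc]

theorem remove_clang_unsupport_cmds_changed : Claim_changed_remove_clang_unsupport_cmds := by unfold Claim_changed_remove_clang_unsupport_cmds; decide

theorem remove_clang_unsupport_cmds_tight : Claim_exact_remove_clang_unsupport_cmds := by
  intro compile_args _ hd0
  unfold D_remove_clang_unsupport_cmds at hd0
  have hd : (compile_args.filter (fun a => !pvBad a)).length < 2 := hd0
  simp only [remove_clang_unsupport_cmds, remove_clang_unsupport_cmds_alt]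
  rw [show (fun arg => if arg = "-external:I" then "-isystem" else arg) = pvSub from rfl,
    pv_filters, pv_slice_dropLast, pv_fold_skip]
  rcases hF : compile_args.filter (fun a => !pvBad a) with _ | ⟨a, t⟩
  · decide
  · rcases t with _ | ⟨b, r⟩
    · simp only [List.map_cons, List.map_nil, List.foldl_cons, List.foldl_nil]
      have s1 : pvGood ([], none) (pvSub a) = (pvSub a :: pvMsvc, none) := by simp [pvGood]
      rw [s1, show ([pvSub a].dropLast : List String) = [] from rfl]
      rw [show (PySem.List.insert (PySem.List.insert (PySem.List.insert
            (PySem.List.insert ([] : List String) 1 "-fms-extensions") 1 "-fms-compatibility")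
            1 "-DWIN32_LEAN_AND_MEAN") 1 "-std=c++14")
          = ["-fms-extensions", "-std=c++14", "-DWIN32_LEAN_AND_MEAN", "-fms-compatibility"]
        from by decide]
      intro heq
      simp only [reduceCtorEq, if_false] at heq
      have := congrArg List.length heq
      simp [pvMsvc] at this
    · rw [hF] at hd; simp at hd
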